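-- pv_equiv track=rewrite | github.com/koernergb/ExcelFormer | engineer_features.py | process_package_name
-- ===== SOURCE A (Python) =====
-- def process_package_name(pkg_name):
--     """Better package name processing"""
--     # Split on dots first
--     parts = pkg_name.split('.')
--
--     # Skip common prefixes that don't add meaning
--     skip_prefixes = {'com', 'org', 'net', 'io', 'air'}
--     meaningful_parts = [p for p in parts if p not in skip_prefixes]
--
--     # Split CamelCase and compound words
--     tokens = []
--     for part in meaningful_parts:
--         # Split on numbers
--         part = ''.join([' '+c if c.isdigit() and i>0 else c
--                        for i,c in enumerate(part)])
--
--         # Split CamelCase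
--         part = ''.join([' '+c if c.isupper() and i>0 else c
--                        for i,c in enumerate(part)])
--
--         # Add individual tokens
--         tokens.extend(part.lower().split())
--
--     return tokens
-- ===== SOURCE B (Python) =====
-- def process_package_name(pkg_name):
--     """Single-pass tokenizer: same tokens, no intermediate rewritten strings."""
--     skip_prefixes = {'com', 'org', 'net', 'io', 'air'}
--     tokens = []
--     for part in pkg_name.split('.'):
--         if part in skip_prefixes:
--             continue
--         buf = []
--         for i, c in enumerate(part):
--             if c.isspace():
--                 if buf:
--                     tokens.append(''.join(buf))
--                     buf = []
--             elif (c.isdigit() or c.isupper()) and i > 0: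
--                 if buf:
--                     tokens.append(''.join(buf))
--                 buf = [c.lower()]
--             else:
--                 buf.append(c.lower())
--         if buf:
--             tokens.append(''.join(buf))
--     return tokens
-- ===== Notes on version B (the rewrite author's own statement) =====
-- stated objective: simpler
-- what changed: Replaces A's two intermediate space-inserting string rewrites plus lower().split() with one direct single-pass buffer tokenizer over each part's characters.
import Mathlib
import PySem

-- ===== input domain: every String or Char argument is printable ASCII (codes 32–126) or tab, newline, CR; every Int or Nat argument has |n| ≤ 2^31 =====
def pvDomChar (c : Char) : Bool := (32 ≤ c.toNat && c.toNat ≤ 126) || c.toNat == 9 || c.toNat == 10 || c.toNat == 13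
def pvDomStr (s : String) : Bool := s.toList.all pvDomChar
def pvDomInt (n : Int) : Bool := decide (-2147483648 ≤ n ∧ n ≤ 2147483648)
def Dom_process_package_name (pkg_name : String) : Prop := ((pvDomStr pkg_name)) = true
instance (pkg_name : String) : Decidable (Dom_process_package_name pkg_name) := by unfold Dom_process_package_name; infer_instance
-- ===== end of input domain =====

-- B replaces A's two space-inserting string rewrites + split with one single-pass buffer tokenizer (objective: simpler; return value only, no mutation).

-- ===== PORT A =====
-- skip_prefixes = {'com', 'org', 'net', 'io', 'air'}
def pnA_skip : PySem.Set (List Char) :=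
  PySem.Set.ofList ["com".toList, "org".toList, "net".toList, "io".toList, "air".toList]

-- loop body: the two ''.join([' '+c if … for i,c in enumerate(part)]) rewrites, then part.lower().split()
def pnA_tokens (part : List Char) : List String :=
  (PySem.Chars.split₀ (PySem.Chars.lower
    (((PySem.List.enumerate
        (((PySem.List.enumerate part).map (fun ic =>
            if PySem.Chars.isdigit ic.2 && decide ((0:Int) < ic.1) then [' ', ic.2] else [ic.2])).flatten)).map
      (fun ic =>
        if PySem.Chars.isupper ic.2 && decide ((0:Int) < ic.1) then [' ', ic.2] else [ic.2])).flatten))).map String.ofList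

def process_package_name (pkg_name : String) : List String :=
  let parts := PySem.Chars.splitOn pkg_name.toList ['.']
  let meaningful := parts.filter (fun p => !(pnA_skip.contains p))
  meaningful.foldl (fun tokens part => tokens ++ pnA_tokens part) []

-- ===== PORT B =====
def pnB_skip : PySem.Set (List Char) :=
  PySem.Set.ofList ["com".toList, "org".toList, "net".toList, "io".toList, "air".toList]

-- if buf: tokens.append(''.join(buf))
def pnB_flush (buf : List Char) (tokens : List String) : List String :=
  if buf.isEmpty then tokens else tokens ++ [String.ofList buf]

-- for i, c in enumerate(part): … (current-token buffer tokenizer)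
def pnB_go : List Char → Int → List Char → List String → List String
  | [], _, buf, tokens => pnB_flush buf tokens
  | c :: cs, i, buf, tokens =>
    if PySem.Chars.isspace c then
      pnB_go cs (i + 1) [] (pnB_flush buf tokens)
    else if (PySem.Chars.isdigit c || PySem.Chars.isupper c) && decide ((0:Int) < i) then
      pnB_go cs (i + 1) [PySem.Chars.lowerChar c] (pnB_flush buf tokens)
    else
      pnB_go cs (i + 1) (buf ++ [PySem.Chars.lowerChar c]) tokens

def process_package_name_alt (pkg_name : String) : List String :=
  (PySem.Chars.splitOn pkg_name.toList ['.']).foldl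
    (fun tokens part => if pnB_skip.contains part then tokens else pnB_go part 0 [] tokens) []

-- ===== PRECONDITION & SPEC =====
def Spec_process_package_name (pkg_name : String) (out : List String) : Prop := out = process_package_name_alt pkg_name
instance (pkg_name : String) (out : List String) : Decidable (Spec_process_package_name pkg_name out) := by unfold Spec_process_package_name; infer_instance

-- ===== CLAIM (what is proved, stated in full; the proofs are below) =====
def Claim_equal_process_package_name : Prop := ∀ (pkg_name : String), Dom_process_package_name pkg_name → Spec_process_package_name pkg_name (process_package_name pkg_name)

-- ===== LEMMAS AND PROOFS =====

-- per-character emission both programs boil down to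
def pnChunk (c : Char) : List Char :=
  if PySem.Chars.isdigit c || PySem.Chars.isupper c then [' ', PySem.Chars.lowerChar c]
  else [PySem.Chars.lowerChar c]

theorem pn_digit_not_upper (c : Char) (h : PySem.Chars.isdigit c = true) : PySem.Chars.isupper c = false := by
  simp only [PySem.Chars.isdigit, Bool.and_eq_true, decide_eq_true_eq, Char.le_def, UInt32.le_iff_toNat_le] at h
  simp only [PySem.Chars.isupper, Bool.and_eq_false_iff, decide_eq_false_iff_not, Char.le_def, UInt32.le_iff_toNat_le, not_le]
  have e0 : '0'.val.toNat = 48 := rfl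
  have e9 : '9'.val.toNat = 57 := rfl
  have eA : 'A'.val.toNat = 65 := rfl
  have eZ : 'Z'.val.toNat = 90 := rfl
  omega

theorem pn_space_not_digit (c : Char) (h : PySem.Chars.isspace c = true) : PySem.Chars.isdigit c = false := by
  simp only [PySem.Chars.isspace, Char.toNat, Bool.or_eq_true, Bool.and_eq_true, decide_eq_true_eq] at h
  simp only [PySem.Chars.isdigit, Bool.and_eq_false_iff, decide_eq_false_iff_not, Char.le_def, UInt32.le_iff_toNat_le, not_le]
  have e0 : '0'.val.toNat = 48 := rfl
  have e9 : '9'.val.toNat = 57 := rfl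
  omega

theorem pn_space_not_upper (c : Char) (h : PySem.Chars.isspace c = true) : PySem.Chars.isupper c = false := by
  simp only [PySem.Chars.isspace, Char.toNat, Bool.or_eq_true, Bool.and_eq_true, decide_eq_true_eq] at h
  simp only [PySem.Chars.isupper, Bool.and_eq_false_iff, decide_eq_false_iff_not, Char.le_def, UInt32.le_iff_toNat_le, not_le]
  have eA : 'A'.val.toNat = 65 := rfl
  have eZ : 'Z'.val.toNat = 90 := rfl
  omega

theorem pn_lower_not_space (c : Char) (h : PySem.Chars.isspace c = false) :
    PySem.Chars.isspace (PySem.Chars.lowerChar c) = false := by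
  unfold PySem.Chars.lowerChar
  split
  · rename_i hu
    simp only [PySem.Chars.isupper, Bool.and_eq_true, decide_eq_true_eq, Char.le_def, UInt32.le_iff_toNat_le] at hu
    have eA : 'A'.val.toNat = 65 := rfl
    have eZ : 'Z'.val.toNat = 90 := rfl
    have hv : (c.val.toNat + 32).isValidChar := by left; omega
    have ht : (Char.ofNat (c.val.toNat + 32)).val.toNat = c.val.toNat + 32 := by
      have := Char.toNat_ofNat (c.val.toNat + 32)
      simp only [Char.toNat] at this
      rw [this, if_pos hv]
    simp only [PySem.Chars.isspace, Char.toNat, Bool.or_eq_false_iff, Bool.and_eq_false_iff,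
      decide_eq_false_iff_not, ht]
    omega
  · exact h

theorem pn_lower_id (c : Char) (h : PySem.Chars.isupper c = false) : PySem.Chars.lowerChar c = c := by
  unfold PySem.Chars.lowerChar
  simp [h]

theorem pn_go_acc (s : List Char) : ∀ (cur : List Char) (acc : List (List Char)),
    PySem.Chars.split₀.go s cur acc = acc.reverse ++ PySem.Chars.split₀.go s cur [] := by
  induction s with
  | nil =>
    intro cur acc
    simp only [PySem.Chars.split₀.go]
    by_cases h : cur.isEmpty <;> simp [h]
  | cons c rest ih =>
    intro cur acc
    simp only [PySem.Chars.split₀.go]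
    by_cases hsp : PySem.Chars.isspace c
    · rw [if_pos hsp, if_pos hsp]
      by_cases h : cur.isEmpty
      · rw [if_pos h, if_pos h]
        exact ih [] acc
      · rw [if_neg h, if_neg h, ih [] (cur.reverse :: acc), ih [] [cur.reverse]]
        simp
    · rw [if_neg hsp, if_neg hsp]
      exact ih (c :: cur) acc

theorem pn_pass_tail (P : Char → Bool) (cs : List Char) : ∀ (k : Int), 1 ≤ k →
    ((PySem.List.enumerate cs k).map (fun ic =>
        if P ic.2 && decide ((0:Int) < ic.1) then [' ', ic.2] else [ic.2])).flatten
      = cs.flatMap (fun c => if P c then [' ', c] else [c]) := by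
  induction cs with
  | nil => intro k _; simp [PySem.List.enumerate]
  | cons c rest ih =>
    intro k hk
    rw [PySem.List.enumerate_cons]
    have h0 : decide ((0:Int) < k) = true := by simp; omega
    simp only [List.map_cons, List.flatten_cons, h0, Bool.and_true, List.flatMap_cons]
    rw [ih (k + 1) (by omega)]

theorem pn_pass (P : Char → Bool) (c : Char) (rest : List Char) :
    ((PySem.List.enumerate (c :: rest)).map (fun ic =>
        if P ic.2 && decide ((0:Int) < ic.1) then [' ', ic.2] else [ic.2])).flatten
      = c :: rest.flatMap (fun c' => if P c' then [' ', c'] else [c']) := by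
  have : PySem.List.enumerate (c :: rest) (0:Int) = (0, c) :: PySem.List.enumerate rest 1 := by
    rw [PySem.List.enumerate_cons]; norm_num
  simp only [PySem.List.enumerate] at this ⊢
  rw [this]
  simp only [List.map_cons, List.flatten_cons]
  rw [pn_pass_tail P rest 1 (by omega)]
  simp

theorem pn_lower_chars (part : List Char) :
    (match part with
      | [] => ([] : List Char)
      | c :: r => PySem.Chars.lowerChar c :: r.flatMap pnChunk)
    = PySem.Chars.lower
        (((PySem.List.enumerate
            (((PySem.List.enumerate part).map (fun ic =>
                if PySem.Chars.isdigit ic.2 && decide ((0:Int) < ic.1) then [' ', ic.2] else [ic.2])).flatten)).map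
          (fun ic =>
            if PySem.Chars.isupper ic.2 && decide ((0:Int) < ic.1) then [' ', ic.2] else [ic.2])).flatten) := by
  cases part with
  | nil => simp [PySem.List.enumerate, PySem.Chars.lower]
  | cons c r =>
    rw [pn_pass (fun c' => PySem.Chars.isdigit c') c r]
    rw [pn_pass (fun c' => PySem.Chars.isupper c') c
        (r.flatMap (fun c' => if PySem.Chars.isdigit c' then [' ', c'] else [c']))]
    rw [List.flatMap_assoc]
    have hsp : ∀ c' : Char,
        ((fun c'' => if PySem.Chars.isdigit c'' then [' ', c''] else [c'']) c').flatMap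
            (fun c'' => if PySem.Chars.isupper c'' then [' ', c''] else [c''])
          = if PySem.Chars.isdigit c' || PySem.Chars.isupper c' then [' ', c'] else [c'] := by
      intro c'
      have hspu : PySem.Chars.isupper ' ' = false := by decide
      by_cases hd : PySem.Chars.isdigit c'
      · have hu := pn_digit_not_upper c' hd
        simp [hd, hu, hspu]
      · by_cases hu : PySem.Chars.isupper c' <;> simp [hd, hu]
    simp only [hsp]
    simp only [PySem.Chars.lower, List.map_cons, List.map_flatMap]
    have hfun : (fun a : Char => List.map PySem.Chars.lowerChar
        (if (PySem.Chars.isdigit a || PySem.Chars.isupper a) = true then [' ', a] else [a])) = pnChunk := by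
      funext c'
      by_cases hb : PySem.Chars.isdigit c' || PySem.Chars.isupper c'
      · simp [pnChunk, hb, PySem.Chars.lowerChar]
        decide
      · simp [pnChunk, hb, PySem.Chars.lowerChar]
    rw [hfun]

theorem pn_go_spec (cs : List Char) : ∀ (i : Int) (buf : List Char) (acc : List String), 1 ≤ i →
    pnB_go cs i buf acc
      = acc ++ (PySem.Chars.split₀.go (cs.flatMap pnChunk) buf.reverse []).map String.ofList := by
  induction cs with
  | nil =>
    intro i buf acc _
    simp only [pnB_go, List.flatMap_nil, PySem.Chars.split₀.go, pnB_flush]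
    by_cases h : buf.isEmpty <;> simp [h]
  | cons c rest ih =>
    intro i buf acc hi
    have hdec : decide ((0:Int) < i) = true := by simp; omega
    by_cases hsp : PySem.Chars.isspace c
    · have hch : pnChunk c = [c] := by
        simp [pnChunk, pn_space_not_digit c hsp, pn_space_not_upper c hsp,
          pn_lower_id c (pn_space_not_upper c hsp)]
      simp only [pnB_go, hsp, if_true, List.flatMap_cons, hch]
      rw [ih (i + 1) [] (pnB_flush buf acc) (by omega)]
      simp only [List.singleton_append, PySem.Chars.split₀.go, hsp, if_true]
      by_cases hb : buf.isEmpty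
      · simp [pnB_flush, hb]
      · simp only [List.isEmpty_reverse, hb, if_false, pnB_flush]
        rw [pn_go_acc (rest.flatMap pnChunk) [] [buf.reverse.reverse]]
        simp
    · simp only [pnB_go, hsp, if_false, hdec, Bool.and_true]
      by_cases hbd : PySem.Chars.isdigit c || PySem.Chars.isupper c
      · have hch : pnChunk c = [' ', PySem.Chars.lowerChar c] := by simp [pnChunk, hbd]
        simp only [hbd, if_true, List.flatMap_cons, hch]
        rw [ih (i + 1) [PySem.Chars.lowerChar c] (pnB_flush buf acc) (by omega)]
        have hls : PySem.Chars.isspace (PySem.Chars.lowerChar c) = false := by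
          simp at hsp; exact pn_lower_not_space c (by simp [hsp])
        simp only [List.cons_append, List.nil_append, PySem.Chars.split₀.go]
        have hspc : PySem.Chars.isspace ' ' = true := by decide
        simp only [hspc, if_true, hls, if_false]
        by_cases hb : buf.isEmpty
        · simp [pnB_flush, hb]
        · simp only [List.isEmpty_reverse, hb, if_false, pnB_flush]
          rw [pn_go_acc (rest.flatMap pnChunk) [PySem.Chars.lowerChar c] [buf.reverse.reverse]]
          simp
      · have hu : PySem.Chars.isupper c = false := by
          rcases Bool.or_eq_false_iff.mp (by simpa using hbd) with ⟨_, h2⟩; exact h2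
        have hch : pnChunk c = [c] := by simp [pnChunk, hbd, pn_lower_id c hu]
        simp only [hbd, if_false, List.flatMap_cons, hch, pn_lower_id c hu]
        rw [ih (i + 1) (buf ++ [c]) acc (by omega)]
        simp only [List.singleton_append, PySem.Chars.split₀.go, hsp, if_false]
        simp

theorem pn_part (part : List Char) (acc : List String) :
    pnB_go part 0 [] acc = acc ++ pnA_tokens part := by
  unfold pnA_tokens
  rw [← pn_lower_chars part]
  cases part with
  | nil => simp [pnB_go, pnB_flush, PySem.Chars.split₀, PySem.Chars.split₀.go]
  | cons c r =>
    simp only [PySem.Chars.split₀]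
    by_cases hsp : PySem.Chars.isspace c
    · have hu := pn_space_not_upper c hsp
      simp only [pnB_go, hsp, if_true, pnB_flush, List.isEmpty_nil]
      rw [show (0:Int) + 1 = 1 from rfl]
      rw [pn_go_spec r 1 [] acc (by omega)]
      simp only [pn_lower_id c hu, PySem.Chars.split₀.go, hsp, if_true, List.isEmpty_nil]
      simp
    · have hdec : decide ((0:Int) < (0:Int)) = false := by decide
      simp only [pnB_go, hsp, if_false, hdec, Bool.and_false, List.nil_append]
      simp only [Bool.false_eq_true, if_false]
      rw [show (0:Int) + 1 = 1 from rfl]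
      rw [pn_go_spec r 1 [PySem.Chars.lowerChar c] acc (by omega)]
      have hls : PySem.Chars.isspace (PySem.Chars.lowerChar c) = false :=
        pn_lower_not_space c (by simpa using hsp)
      simp only [PySem.Chars.split₀.go, hls, if_false]
      simp

theorem pn_fold (ps : List (List Char)) : ∀ (acc : List String),
    ps.foldl (fun t p => if (!pnA_skip.contains p) = true then t ++ pnA_tokens p else t) acc
      = ps.foldl (fun t p => if pnB_skip.contains p then t else pnB_go p 0 [] t) acc := by
  induction ps with
  | nil => intro acc; rfl
  | cons p rest ih =>
    intro acc
    have hss : pnB_skip = pnA_skip := rfl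
    rw [List.foldl_cons, List.foldl_cons, hss]
    by_cases h : pnA_skip.contains p
    · simp only [h, Bool.not_true, Bool.false_eq_true, if_false, eq_self_iff_true, if_true]
      exact ih acc
    · rw [Bool.not_eq_true] at h
      simp only [h, Bool.not_false, Bool.false_eq_true, if_false, eq_self_iff_true, if_true]
      rw [pn_part]
      exact ih (acc ++ pnA_tokens p)

-- ===== VERDICT (by name: the statement is the Claim_ definition above) =====
theorem process_package_name_spec : Claim_equal_process_package_name := by
  intro pkg_name _
  unfold Spec_process_package_name process_package_name process_package_name_alt
  rw [List.foldl_filter]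
  exact pn_fold (PySem.Chars.splitOn pkg_name.toList ['.']) []
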